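-- pv_equiv track=rewrite | github.com/cirosantilli/project-euler-solvers | solvers/362.py | generate_exponent_sequences
-- ===== SOURCE A (Python) =====
-- FIRST_10_PRIMES = (2, 3, 5, 7, 11, 13, 17, 19, 23, 29)
--
-- def generate_exponent_sequences(limit: int) -> list[tuple[int, ...]]:
--     """
--     Generate all ordered exponent sequences (e1, e2, ..., ek), k>=1,
--     such that using the smallest k primes yields a product <= limit.
--     This is a necessary and sufficient existence condition.
--     """
--     seqs: list[tuple[int, ...]] = []
--
--     def rec(i: int, prod: int, seq: list[int]) -> None:
--         if seq:
--             seqs.append(tuple(seq))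
--         if i >= len(FIRST_10_PRIMES):
--             return
--         p = FIRST_10_PRIMES[i]
--         pe = p
--         e = 1
--         while prod * pe <= limit:
--             seq.append(e)
--             rec(i + 1, prod * pe, seq)
--             seq.pop()
--             e += 1
--             pe *= p
--
--     rec(0, 1, [])
--     return seqs
-- ===== SOURCE B (Python) =====
-- FIRST_10_PRIMES = (2, 3, 5, 7, 11, 13, 17, 19, 23, 29)
--
-- def generate_exponent_sequences(limit: int) -> list:
--     """Pure recursion over the remaining primes: seqs_from returns every
--     nonempty exponent suffix whose product of powers fits under cap; the
--     parent prepends its own exponent.  No shared accumulator, no mutation;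
--     the shrinking budget is carried by floor division instead of a growing
--     product."""
--     def seqs_from(primes, cap):
--         if not primes:
--             return []
--         p, rest = primes[0], primes[1:]
--         out = []
--         pe = p
--         e = 1
--         while pe <= cap:
--             out.append((e,))
--             out.extend((e,) + t for t in seqs_from(rest, cap // pe))
--             e += 1
--             pe *= p
--         return out
--     return seqs_from(list(FIRST_10_PRIMES), limit)
-- ===== Notes on version B (the rewrite author's own statement) =====
-- stated objective: alternative
-- what changed: A does an imperative pre-order DFS mutating a shared prefix list and a global accumulator while multiplying a running product up towards limit; B is a pure recursion over the remaining primes that returns the list of exponent suffixes fitting under a budget carried down by floor division (cap // p**e) and prepends each parent exponent.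
import Mathlib
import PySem

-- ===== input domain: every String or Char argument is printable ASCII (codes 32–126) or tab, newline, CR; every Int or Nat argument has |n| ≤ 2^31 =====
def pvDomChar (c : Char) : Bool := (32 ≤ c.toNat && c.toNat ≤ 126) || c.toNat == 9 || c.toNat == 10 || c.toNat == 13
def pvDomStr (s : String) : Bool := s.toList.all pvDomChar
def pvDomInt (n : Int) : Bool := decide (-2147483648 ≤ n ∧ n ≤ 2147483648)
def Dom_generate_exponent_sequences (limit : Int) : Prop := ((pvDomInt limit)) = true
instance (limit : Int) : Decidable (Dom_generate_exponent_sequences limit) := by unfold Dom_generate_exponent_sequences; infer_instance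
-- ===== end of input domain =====

-- B replaces A's imperative accumulator-and-mutable-prefix DFS by a pure recursion that
-- returns exponent suffixes under a floor-divided budget and prepends the parent exponent
-- (objective: alternative decomposition, same cost). Return-value equivalence only: A
-- mutates no argument. Each port's unbounded `while` carries a Nat fuel of 40; on any
-- input the loop body runs at most 32 times when |limit| ≤ 2^31 (the stated domain), so
-- the fuel is never exhausted there and both ports are exact on the domain.

-- ===== PORT A =====
-- A's rec(i, prod, seq) with the global accumulator `seqs`: the index i becomes structural
-- recursion over the remaining primes, `seqs`/`seq` become threaded parameters.
mutual
def pvRecA (limit : Int) (ps : List Int) (prod : Int) (seq : List Int)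
    (seqs : List (List Int)) : List (List Int) :=
  let seqs1 := if seq = [] then seqs else seqs ++ [seq]   -- `if seq: seqs.append(tuple(seq))`
  match ps with
  | [] => seqs1                                            -- `if i >= len(...): return`
  | p :: rest => pvLoopA limit p rest prod seq seqs1 p 1 40
  termination_by (ps.length, 41)

def pvLoopA (limit p : Int) (rest : List Int) (prod : Int) (seq : List Int)
    (seqs : List (List Int)) (pe e : Int) (fuel : Nat) : List (List Int) :=
  match fuel with
  | 0 => seqs
  | f + 1 =>
    if prod * pe ≤ limit then
      pvLoopA limit p rest prod seq
        (pvRecA limit rest (prod * pe) (seq ++ [e]) seqs) (pe * p) (e + 1) f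
    else seqs
  termination_by (rest.length + 1, fuel)
end

def generate_exponent_sequences (limit : Int) : List (List Int) :=
  pvRecA limit [2, 3, 5, 7, 11, 13, 17, 19, 23, 29] 1 [] []

-- ===== PORT B =====
-- Source B's seqs_from(primes, cap): pure recursion returning the nonempty suffixes; `cap // pe`
-- is PySem.Int.floordiv; the `while` carries the same fuel discipline as A's port.
mutual
def pvSeqsFromB (ps : List Int) (cap : Int) : List (List Int) :=
  match ps with
  | [] => []
  | p :: rest => pvLoopB rest cap p p 1 40
  termination_by (ps.length, 41)

def pvLoopB (rest : List Int) (cap p pe e : Int) (fuel : Nat) : List (List Int) :=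
  match fuel with
  | 0 => []
  | f + 1 =>
    if pe ≤ cap then
      ([e] :: (pvSeqsFromB rest (PySem.Int.floordiv cap pe)).map (fun t => e :: t))
        ++ pvLoopB rest cap p (pe * p) (e + 1) f
    else []
  termination_by (rest.length + 1, fuel)
end

def generate_exponent_sequences_alt (limit : Int) : List (List Int) :=
  pvSeqsFromB [2, 3, 5, 7, 11, 13, 17, 19, 23, 29] limit

-- ===== PRECONDITION & SPEC =====
def Spec_generate_exponent_sequences (limit : Int) (out : List (List Int)) : Prop := out = generate_exponent_sequences_alt limit
instance (limit : Int) (out : List (List Int)) : Decidable (Spec_generate_exponent_sequences limit out) := by unfold Spec_generate_exponent_sequences; infer_instance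

-- ===== CLAIM (what is proved, stated in full; the proofs are below) =====
def Claim_equal_generate_exponent_sequences : Prop := ∀ (limit : Int), Dom_generate_exponent_sequences limit → Spec_generate_exponent_sequences limit (generate_exponent_sequences limit)

-- ===== LEMMAS AND PROOFS =====

-- The two fuelled e-loops run in lockstep: A's test `prod * pe ≤ limit` is B's
-- `pe ≤ limit // prod` (prod ≥ 1), and A's child budget matches B's nested floordiv.
lemma pv_loop_eq (limit p : Int) (rest : List Int) (hp : 1 ≤ p)
    (IH : ∀ (prod : Int) (seq : List Int) (seqs : List (List Int)), 1 ≤ prod →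
      pvRecA limit rest prod seq seqs =
        (if seq = [] then seqs else seqs ++ [seq]) ++
          (pvSeqsFromB rest (PySem.Int.floordiv limit prod)).map (fun t => seq ++ t)) :
    ∀ (fuel : Nat) (prod pe e : Int) (seq : List Int) (seqs : List (List Int)),
      1 ≤ prod → 1 ≤ pe →
      pvLoopA limit p rest prod seq seqs pe e fuel =
        seqs ++ (pvLoopB rest (PySem.Int.floordiv limit prod) p pe e fuel).map
          (fun t => seq ++ t) := by
  intro fuel
  induction fuel with
  | zero => intro prod pe e seq seqs _ _; simp [pvLoopA, pvLoopB]
  | succ f ihf =>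
    intro prod pe e seq seqs hprod hpe
    have hcond : prod * pe ≤ limit ↔ pe ≤ PySem.Int.floordiv limit prod := by
      rw [PySem.Int.le_floordiv_iff_mul_le (by omega : (0:Int) < prod), mul_comm]
    have hnest : PySem.Int.floordiv (PySem.Int.floordiv limit prod) pe
        = PySem.Int.floordiv limit (prod * pe) := by
      rw [PySem.Int.floordiv_eq_ediv_of_pos (by omega : (0:Int) < prod),
          PySem.Int.floordiv_eq_ediv_of_pos (by omega : (0:Int) < pe),
          PySem.Int.floordiv_eq_ediv_of_pos (by nlinarith : (0:Int) < prod * pe),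
          Int.ediv_ediv_of_nonneg (by omega : (0:Int) ≤ prod)]
    by_cases h : prod * pe ≤ limit
    · have h' : pe ≤ PySem.Int.floordiv limit prod := hcond.mp h
      simp only [pvLoopA, pvLoopB, if_pos h, if_pos h']
      rw [IH (prod * pe) (seq ++ [e]) seqs (by nlinarith)]
      rw [ihf (prod) (pe * p) (e + 1) seq _ hprod (by nlinarith)]
      simp [hnest, List.map_map, Function.comp, List.append_assoc]
    · have h' : ¬ pe ≤ PySem.Int.floordiv limit prod := fun hh => h (hcond.mpr hh)
      simp [pvLoopA, pvLoopB, if_neg h, if_neg h']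

-- A's DFS from (ps, prod, seq, seqs) equals: emit seq, then prepend seq to every suffix
-- that B generates under budget limit // prod.
lemma pv_recA_eq (limit : Int) :
    ∀ (ps : List Int), (∀ q ∈ ps, 1 ≤ q) →
    ∀ (prod : Int) (seq : List Int) (seqs : List (List Int)), 1 ≤ prod →
      pvRecA limit ps prod seq seqs =
        (if seq = [] then seqs else seqs ++ [seq]) ++
          (pvSeqsFromB ps (PySem.Int.floordiv limit prod)).map (fun t => seq ++ t) := by
  intro ps
  induction ps with
  | nil => intro _ prod seq seqs _; simp [pvRecA, pvSeqsFromB]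
  | cons p rest ih =>
    intro hps prod seq seqs hprod
    have hp : 1 ≤ p := hps p (List.mem_cons_self ..)
    have ih' := fun prod seq seqs h =>
      ih (fun q hq => hps q (List.mem_cons_of_mem _ hq)) prod seq seqs h
    simp only [pvRecA, pvSeqsFromB]
    exact pv_loop_eq limit p rest hp ih' 40 prod p 1 seq _ hprod hp

-- ===== VERDICT (by name: the statement is the Claim_ definition above) =====
theorem generate_exponent_sequences_spec : Claim_equal_generate_exponent_sequences := by
  intro limit _
  unfold Spec_generate_exponent_sequences generate_exponent_sequences
    generate_exponent_sequences_alt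
  rw [pv_recA_eq limit _ (by decide) 1 [] [] (le_refl 1)]
  simp
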